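-- pv_equiv track=rewrite | github.com/qq793199244/HuaWeiCode | HJ96表示数字.py | func
-- ===== SOURCE A (Python) =====
-- def func(s):
--     res = ''
--     if '0' <= s[0] <= '9':
--         res = '*' + s[0]
--     else:
--         res += s[0]
--     for cur in range(1, len(s)):
--         if '0' <= s[cur] <= '9':
--             if '0' <= s[cur - 1] <= '9':
--                 res += s[cur]
--             else:
--                 res = res + '*' + s[cur]
--         else:
--             if '0' <= s[cur - 1] <= '9':
--                 res = res + '*' + s[cur]
--             else:
--                 res += s[cur]
--     if '0' <= s[-1] <= '9':
--         res += '*'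
--     return res
-- ===== SOURCE B (Python) =====
-- def func(s):
--     parts = []
--     i = 0
--     n = len(s)
--     while i < n:
--         d = '0' <= s[i] <= '9'
--         j = i + 1
--         while j < n and (('0' <= s[j] <= '9') == d):
--             j += 1
--         run = s[i:j]
--         parts.append('*' + run + '*' if d else run)
--         i = j
--     return ''.join(parts)
-- ===== Notes on version B (the rewrite author's own statement) =====
-- stated objective: faster
-- what changed: B replaces A's character-by-character scan with lookback at the previous character (emitting opening/closing asterisks at class transitions plus a trailing fix-up) by a single pass over maximal digit/non-digit runs that wraps each digit run in asterisks and joins the collected parts once.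
import Mathlib
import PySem

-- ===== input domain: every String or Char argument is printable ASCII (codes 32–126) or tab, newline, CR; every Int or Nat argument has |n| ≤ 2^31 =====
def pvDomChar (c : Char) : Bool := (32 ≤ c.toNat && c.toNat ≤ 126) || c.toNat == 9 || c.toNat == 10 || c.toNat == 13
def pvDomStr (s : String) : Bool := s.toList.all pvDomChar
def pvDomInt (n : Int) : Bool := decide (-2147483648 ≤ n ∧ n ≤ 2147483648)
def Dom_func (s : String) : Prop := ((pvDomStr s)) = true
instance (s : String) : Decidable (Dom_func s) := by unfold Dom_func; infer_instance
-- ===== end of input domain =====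

-- B rewrites A's char-by-char scan with lookback as a single pass over maximal
-- digit/non-digit runs, wrapping each digit run in asterisks and joining parts once (objective: faster,
-- measured constant-factor: run slicing + one join vs per-char concatenation).
-- A mutates nothing; equivalence is about the return value.

-- '0' <= c <= '9' (ASCII comparison, exact)
def isDig (c : Char) : Bool := decide ('0' ≤ c) && decide (c ≤ '9')

-- ===== PORT A =====
-- the for-loop of A: prev is s[cur-1], rest the remaining chars, res the accumulator
def funcALoop (prev : Char) (rest : List Char) (res : List Char) : List Char :=
  match rest with
  | [] => res
  | c :: cs =>
    if isDig c then
      if isDig prev then funcALoop c cs (res ++ [c])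
      else funcALoop c cs (res ++ ['*', c])
    else
      if isDig prev then funcALoop c cs (res ++ ['*', c])
      else funcALoop c cs (res ++ [c])

def func (s : String) : String :=
  match s.toList with
  | [] => ""   -- Python A raises IndexError here (s[0]); excluded by Pre_func
  | c0 :: cs =>
    let res0 : List Char := if isDig c0 then ['*', c0] else [c0]
    let r := funcALoop c0 cs res0
    let r := if isDig (cs.getLastD c0) then r ++ ['*'] else r  -- s[-1]
    String.mk r

-- ===== PORT B =====
-- inner while of B: collect the rest of the current run of class d, return (run, remainder)
def runB (d : Bool) (l : List Char) : List Char × List Char :=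
  match l with
  | [] => ([], [])
  | c :: cs => if isDig c == d then
      let p := runB d cs
      (c :: p.1, p.2)
    else ([], c :: cs)

theorem runB_len (d : Bool) (l : List Char) : (runB d l).2.length ≤ l.length := by
  induction l with
  | nil => simp [runB]
  | cons c cs ih =>
    simp only [runB]
    split
    · simpa using Nat.le_trans ih (Nat.le_succ _)
    · simp

-- outer while of B: emit each run, digit runs wrapped in '*'
def partsB (l : List Char) : List Char :=
  match l with
  | [] => []
  | c :: cs =>
    let d := isDig c
    let p := runB d cs
    (if d then '*' :: c :: p.1 ++ ['*'] else c :: p.1) ++ partsB p.2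
termination_by l.length
decreasing_by
  exact Nat.lt_succ_of_le (runB_len _ cs)

def func_alt (s : String) : String := String.mk (partsB s.toList)

-- ===== PRECONDITION & SPEC =====
-- Pre_func excludes only the empty string, on which A raises IndexError.
def Pre_func (s : String) : Prop := s ≠ ""
instance (s : String) : Decidable (Pre_func s) := by unfold Pre_func; infer_instance
def pvWitness_func : String := "a12b"

def Spec_func (s : String) (out : String) : Prop := out = func_alt s
instance (s : String) (out : String) : Decidable (Spec_func s out) := by unfold Spec_func; infer_instance

-- ===== CLAIM (what is proved, stated in full; the proofs are below) =====
def Claim_equal_func : Prop := ∀ (s : String), Dom_func s → Pre_func s → Spec_func s (func s)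

-- ===== LEMMAS AND PROOFS =====

-- A's loop body, keyed only on the digit-class of the previous character
def E (d : Bool) : List Char → List Char
  | [] => []
  | c :: cs => (if isDig c == d then [c] else ['*', c]) ++ E (isDig c) cs

theorem funcALoop_eq_E (l : List Char) : ∀ (prev : Char) (res : List Char),
    funcALoop prev l res = res ++ E (isDig prev) l := by
  induction l with
  | nil => intro prev res; simp [funcALoop, E]
  | cons c cs ih =>
    intro prev res
    by_cases hc : isDig c = true <;> by_cases hp : isDig prev = true <;>
      simp [funcALoop, E, hc, hp, ih]

theorem runB_spec (d : Bool) (l : List Char) :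
    l = (runB d l).1 ++ (runB d l).2 ∧ (∀ x ∈ (runB d l).1, isDig x = d) ∧
      (∀ x ∈ (runB d l).2.head?, isDig x ≠ d) := by
  induction l with
  | nil => simp [runB]
  | cons c cs ih =>
    by_cases hc : isDig c = d
    · simp only [runB, hc, beq_self_eq_true, if_true]
      refine ⟨by simpa using ih.1, ?_, ih.2.2⟩
      intro x hx
      rcases List.mem_cons.1 hx with h | h
      · subst h; exact hc
      · exact ih.2.1 x h
    · simp [runB, hc]

theorem E_run (r : List Char) (d : Bool) (rest : List Char)
    (h : ∀ x ∈ r, isDig x = d) : E d (r ++ rest) = r ++ E d rest := by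
  induction r with
  | nil => simp
  | cons c cs ih =>
    have hc : isDig c = d := h c (List.mem_cons_self ..)
    simp only [List.cons_append, E, hc, beq_self_eq_true, if_true]
    simp [ih (fun x hx => h x (List.mem_cons_of_mem _ hx))]

theorem last_run (r : List Char) (d : Bool) (c : Char)
    (h : ∀ x ∈ r, isDig x = d) (hc : isDig c = d) : isDig (r.getLastD c) = d := by
  rcases List.eq_nil_or_concat r with rfl | ⟨ys, y, rfl⟩
  · simpa using hc
  · rw [List.concat_eq_append] at h ⊢
    rw [List.getLastD_concat]
    exact h y (by simp)

theorem getLastD_app (r rest : List Char) (c c' : Char) (h : rest ≠ []) :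
    (r ++ rest).getLastD c = rest.getLastD c' := by
  rcases List.eq_nil_or_concat rest with rfl | ⟨ys, y, rfl⟩
  · exact absurd rfl h
  · rw [List.concat_eq_append, ← List.append_assoc, List.getLastD_concat,
      List.getLastD_concat]

-- wrap c cs is exactly what port A computes on c :: cs
def wrap (c : Char) (cs : List Char) : List Char :=
  let res0 : List Char := if isDig c then ['*', c] else [c]
  let r := res0 ++ E (isDig c) cs
  if isDig (cs.getLastD c) then r ++ ['*'] else r

theorem key (n : Nat) : ∀ cs : List Char, cs.length ≤ n → ∀ c : Char,
    wrap c cs = partsB (c :: cs) := by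
  induction n with
  | zero =>
    intro cs hcs c
    have hnil : cs = [] := List.length_eq_zero_iff.1 (Nat.le_zero.1 hcs)
    subst hnil
    conv_rhs => rw [partsB]
    by_cases hc : isDig c = true <;> simp [wrap, runB, E, partsB, hc]
  | succ n ih =>
    intro cs hcs c
    obtain ⟨hsplit, hrun, hhead⟩ := runB_spec (isDig c) cs
    set r := (runB (isDig c) cs).1 with hr
    set rest := (runB (isDig c) cs).2 with hrest
    have hE : E (isDig c) cs = r ++ E (isDig c) rest := by
      rw [hsplit]; exact E_run r _ rest hrun
    have hpB : partsB (c :: cs) =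
        (if isDig c then '*' :: c :: r ++ ['*'] else c :: r) ++ partsB rest := by
      rw [partsB]
    cases hcase : rest with
    | nil =>
      have hcs0 : cs = r := by rw [hsplit, hcase, List.append_nil]
      have hlast : isDig (cs.getLastD c) = isDig c := by
        rw [hcs0]; exact last_run r _ c hrun rfl
      rw [hpB, hcase, wrap, hE, hcase]
      rw [hlast]
      by_cases hc : isDig c = true <;> simp [hc, E, partsB]
    | cons c' rest' =>
      have hc' : isDig c' = !(isDig c) := by
        have h := hhead c' (by rw [hcase]; rfl)
        cases hx : isDig c' <;> cases hy : isDig c <;> simp [hx, hy] at h ⊢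
      have hlen : rest'.length ≤ n := by
        have h1 : rest.length ≤ cs.length := by rw [hrest]; exact runB_len _ cs
        rw [hcase] at h1
        simp only [List.length_cons] at h1
        omega
      have hih := ih rest' hlen c'
      have hlast : cs.getLastD c = rest'.getLastD c' := by
        rw [hsplit, hcase, getLastD_app r (c' :: rest') c c' (by simp),
          List.getLastD_cons]
      have hErest : E (isDig c) rest = ['*', c'] ++ E (isDig c') rest' := by
        rw [hcase]
        simp [E, hc']
      rw [hpB, hcase, ← hih, wrap, wrap, hE, hErest, hlast, hc']
      cases hdc : isDig c <;> cases hl : isDig (rest'.getLastD c') <;> simp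

theorem func_eq_wrap (c : Char) (cs : List Char) (s : String) (h : s.toList = c :: cs) :
    func s = String.mk (wrap c cs) := by
  simp only [func, h, wrap, funcALoop_eq_E]

-- ===== VERDICT (by name: the statement is the Claim_ definition above) =====
theorem func_spec : Claim_equal_func := by
  intro s _ hpre
  unfold Spec_func func_alt
  cases hs : s.toList with
  | nil =>
    exact absurd (String.toList_eq_nil_iff.mp hs) hpre
  | cons c cs =>
    rw [func_eq_wrap c cs s hs, key cs.length cs le_rfl c]
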